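-- pv_equiv track=rewrite | github.com/ichikawa85/lol-sim | modules/get-data/plot_fig_ap.py | q_damage
-- ===== SOURCE A (Python) =====
-- def q_damage(lv):
--     skill_level=0
--     get_q_level=[1,4,5,7,9]
--     q_damage_list = [60,105,150,195,240]
--     for level in get_q_level:
--         if lv >= level:
--             skill_level+=1
--
--     return q_damage_list[skill_level-1]
-- ===== SOURCE B (Python) =====
-- import bisect
--
-- def q_damage(lv):
--     skill_level = bisect.bisect_right([1, 4, 5, 7, 9], lv)
--     return [60, 105, 150, 195, 240][skill_level - 1]
-- ===== Notes on version B (the rewrite author's own statement) =====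
-- stated objective: idiomatic
-- what changed: Replaced the linear counting loop over the thresholds with bisect.bisect_right, which locates the skill level by binary search; the -1 indexing (and thus the lv<1 case returning 240) is kept.
import Mathlib
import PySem

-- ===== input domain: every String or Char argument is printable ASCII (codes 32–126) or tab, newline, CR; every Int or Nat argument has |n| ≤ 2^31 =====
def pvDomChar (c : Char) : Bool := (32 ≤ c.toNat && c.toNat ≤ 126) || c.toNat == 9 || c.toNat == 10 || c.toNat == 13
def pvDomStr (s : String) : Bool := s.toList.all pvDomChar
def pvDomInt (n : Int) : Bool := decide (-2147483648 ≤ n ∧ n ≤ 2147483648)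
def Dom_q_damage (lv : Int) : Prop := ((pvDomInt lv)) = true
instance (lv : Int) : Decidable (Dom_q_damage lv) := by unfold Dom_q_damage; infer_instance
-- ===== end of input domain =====

-- B replaces A's linear counting loop over the thresholds with bisect_right (binary search);
-- the -1 indexing is kept, so lv < 1 still yields q_damage_list[-1] = 240.

-- ===== PORT A =====
def q_damage (lv : Int) : Int :=
  let get_q_level : List Int := [1, 4, 5, 7, 9]
  let q_damage_list : List Int := [60, 105, 150, 195, 240]
  let skill_level : Int :=
    get_q_level.foldl (fun acc level => if lv ≥ level then acc + 1 else acc) 0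
  (PySem.List.pyGet? q_damage_list (skill_level - 1)).getD 0

-- ===== PORT B =====
-- literal transliteration of bisect.bisect_right's lo/hi loop (terminates since hi - lo decreases)
def bisectRight (a : List Int) (x : Int) (lo hi : Nat) : Nat :=
  if _h : lo < hi then
    let mid := (lo + hi) / 2
    if x < a.getD mid 0 then bisectRight a x lo mid
    else bisectRight a x (mid + 1) hi
  else lo
termination_by hi - lo
decreasing_by
  · omega
  · omega

def q_damage_alt (lv : Int) : Int :=
  let thresholds : List Int := [1, 4, 5, 7, 9]
  let skill_level : Int := (bisectRight thresholds lv 0 thresholds.length : Int)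
  (PySem.List.pyGet? [60, 105, 150, 195, 240] (skill_level - 1)).getD 0

-- ===== PRECONDITION & SPEC =====
def Spec_q_damage (lv : Int) (out : Int) : Prop := out = q_damage_alt lv
instance (lv : Int) (out : Int) : Decidable (Spec_q_damage lv out) := by unfold Spec_q_damage; infer_instance

-- ===== CLAIM (what is proved, stated in full; the proofs are below) =====
def Claim_equal_q_damage : Prop := ∀ (lv : Int), Dom_q_damage lv → Spec_q_damage lv (q_damage lv)

-- ===== LEMMAS AND PROOFS =====

-- ===== VERDICT (by name: the statement is the Claim_ definition above) =====
theorem q_damage_spec : Claim_equal_q_damage := by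
  intro lv _
  unfold Spec_q_damage q_damage q_damage_alt
  have hreg : lv < 1 ∨ (1 ≤ lv ∧ lv < 4) ∨ (4 ≤ lv ∧ lv < 5) ∨ (5 ≤ lv ∧ lv < 7)
      ∨ (7 ≤ lv ∧ lv < 9) ∨ 9 ≤ lv := by omega
  rcases hreg with h | h | h | h | h | h
  · have a1 : ¬ lv ≥ 1 := by omega
    have a4 : ¬ lv ≥ 4 := by omega
    have a5 : ¬ lv ≥ 5 := by omega
    have a7 : ¬ lv ≥ 7 := by omega
    have a9 : ¬ lv ≥ 9 := by omega
    have b5 : lv < 5 := by omega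
    have b1 : lv < 1 := by omega
    have b4 : lv < 4 := by omega
    simp [List.foldl, bisectRight, a1, a4, a5, a7, a9, b5, b1, b4,
      PySem.List.pyGet?, PySem.List.pyIdx?]
  · have a1 : lv ≥ 1 := by omega
    have a4 : ¬ lv ≥ 4 := by omega
    have a5 : ¬ lv ≥ 5 := by omega
    have a7 : ¬ lv ≥ 7 := by omega
    have a9 : ¬ lv ≥ 9 := by omega
    have b5 : lv < 5 := by omega
    have b1 : ¬ lv < 1 := by omega
    have b4 : lv < 4 := by omega
    simp [List.foldl, bisectRight, a1, a4, a5, a7, a9, b5, b1, b4,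
      PySem.List.pyGet?, PySem.List.pyIdx?]
  · have a1 : lv ≥ 1 := by omega
    have a4 : lv ≥ 4 := by omega
    have a5 : ¬ lv ≥ 5 := by omega
    have a7 : ¬ lv ≥ 7 := by omega
    have a9 : ¬ lv ≥ 9 := by omega
    have b5 : lv < 5 := by omega
    have b1 : ¬ lv < 1 := by omega
    have b4 : ¬ lv < 4 := by omega
    simp [List.foldl, bisectRight, a1, a4, a5, a7, a9, b5, b1, b4,
      PySem.List.pyGet?, PySem.List.pyIdx?]
  · have a1 : lv ≥ 1 := by omega
    have a4 : lv ≥ 4 := by omega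
    have a5 : lv ≥ 5 := by omega
    have a7 : ¬ lv ≥ 7 := by omega
    have a9 : ¬ lv ≥ 9 := by omega
    have b5 : ¬ lv < 5 := by omega
    have b9 : lv < 9 := by omega
    have b7 : lv < 7 := by omega
    simp [List.foldl, bisectRight, a1, a4, a5, a7, a9, b5, b9, b7,
      PySem.List.pyGet?, PySem.List.pyIdx?]
  · have a1 : lv ≥ 1 := by omega
    have a4 : lv ≥ 4 := by omega
    have a5 : lv ≥ 5 := by omega
    have a7 : lv ≥ 7 := by omega
    have a9 : ¬ lv ≥ 9 := by omega
    have b5 : ¬ lv < 5 := by omega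
    have b9 : lv < 9 := by omega
    have b7 : ¬ lv < 7 := by omega
    simp [List.foldl, bisectRight, a1, a4, a5, a7, a9, b5, b9, b7,
      PySem.List.pyGet?, PySem.List.pyIdx?]
  · have a1 : lv ≥ 1 := by omega
    have a4 : lv ≥ 4 := by omega
    have a5 : lv ≥ 5 := by omega
    have a7 : lv ≥ 7 := by omega
    have a9 : lv ≥ 9 := by omega
    have b5 : ¬ lv < 5 := by omega
    have b9 : ¬ lv < 9 := by omega
    simp [List.foldl, bisectRight, a1, a4, a5, a7, a9, b5, b9,
      PySem.List.pyGet?, PySem.List.pyIdx?]
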